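-- pv_equiv track=rewrite | github.com/Peopl3s/algorithms-practice | Поиск/max_pair_product.py | max_tournament
-- ===== SOURCE A (Python) =====
-- from typing import Sequence, Tuple, MutableSequence
--
-- def max_tournament(lo: int, hi: int, seq: Sequence[int]) -> Tuple[int, MutableSequence[int]]:
--     if lo >= hi:
--         return seq[lo], []
--     mid = lo + (hi - lo) // 2
--     value1, seq1 = max_tournament(lo, mid, seq)
--     value2, seq2 = max_tournament(mid + 1, hi, seq)
--
--     if value1 > value2:
--         seq1.append(value2)
--         return value1, seq1
--     seq2.append(value1)
--     return value2, seq2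
-- ===== SOURCE B (Python) =====
-- def _beaten(lo, hi, w, seq):
--     if lo >= hi:
--         return []
--     mid = lo + (hi - lo) // 2
--     if w <= mid:
--         return [max(seq[mid + 1:hi + 1])] + _beaten(lo, mid, w, seq)
--     return [max(seq[lo:mid + 1])] + _beaten(mid + 1, hi, w, seq)
--
--
-- def max_tournament(lo, hi, seq):
--     if lo >= hi:
--         return seq[lo], []
--     window = seq[lo:hi + 1]
--     m = max(window)
--     w = hi - window[::-1].index(m)
--     return m, _beaten(lo, hi, w, seq)[::-1]
-- ===== Notes on version B (the rewrite author's own statement) =====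
-- stated objective: alternative
-- what changed: A merges two recursive tournament calls per node; B computes the maximum and its rightmost index with one scan of the window, then descends only the single root-to-winner path of the bisection tree, recording the sibling half's maximum at each level and reversing.
-- outside the precondition, e.g. on max_tournament(-2, 0, [5, 3]): A returns (5, [5]), B raises ValueError; on max_tournament(-3, -1, [5, 3, 4]): A returns (5, [3, 4]), B raises ValueError
import Mathlib
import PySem

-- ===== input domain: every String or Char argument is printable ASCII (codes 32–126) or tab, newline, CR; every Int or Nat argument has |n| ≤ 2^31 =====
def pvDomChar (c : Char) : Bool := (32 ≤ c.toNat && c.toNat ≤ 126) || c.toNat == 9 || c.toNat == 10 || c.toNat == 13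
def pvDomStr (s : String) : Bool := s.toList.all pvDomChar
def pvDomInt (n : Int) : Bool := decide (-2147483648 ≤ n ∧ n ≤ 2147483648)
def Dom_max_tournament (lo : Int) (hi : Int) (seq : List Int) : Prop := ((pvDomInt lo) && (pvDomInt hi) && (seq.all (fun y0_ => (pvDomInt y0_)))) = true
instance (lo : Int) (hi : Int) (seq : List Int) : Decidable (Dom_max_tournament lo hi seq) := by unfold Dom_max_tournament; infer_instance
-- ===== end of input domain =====

-- B replaces A's two-sided recursion (two recursive calls per node) by one scan for the max and its
-- rightmost index followed by a single root-to-winner descent recording sibling-half maxima (alternative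
-- decomposition, same cost); equal return values proved on Pre_.
-- ===== PORT A =====
def max_tournament (lo : Int) (hi : Int) (seq : List Int) : Int × List Int :=
  if lo ≥ hi then ((PySem.List.pyGet? seq lo).getD 0, [])
  else
    let mid := lo + PySem.Int.floordiv (hi - lo) 2
    let r1 := max_tournament lo mid seq
    let r2 := max_tournament (mid + 1) hi seq
    if r1.1 > r2.1 then (r1.1, r1.2 ++ [r2.1]) else (r2.1, r2.2 ++ [r1.1])
termination_by (hi - lo).toNat
decreasing_by
  · have h2 : PySem.Int.floordiv (hi - lo) 2 = (hi - lo) / 2 :=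
      PySem.Int.floordiv_eq_ediv_of_pos (by omega)
    rw [h2]; omega
  · have h2 : PySem.Int.floordiv (hi - lo) 2 = (hi - lo) / 2 :=
      PySem.Int.floordiv_eq_ediv_of_pos (by omega)
    rw [h2]; omega

-- ===== PORT B =====
-- helper _beaten of Source B: descend toward winner index w, recording the other half's max
def pvBeaten (lo : Int) (hi : Int) (w : Int) (seq : List Int) : List Int :=
  if lo ≥ hi then []
  else
    let mid := lo + PySem.Int.floordiv (hi - lo) 2
    if w ≤ mid then
      (PySem.List.max? (PySem.List.slice seq (some (mid + 1)) (some (hi + 1))) id).getD 0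
        :: pvBeaten lo mid w seq
    else
      (PySem.List.max? (PySem.List.slice seq (some lo) (some (mid + 1))) id).getD 0
        :: pvBeaten (mid + 1) hi w seq
termination_by (hi - lo).toNat
decreasing_by
  · have h2 : PySem.Int.floordiv (hi - lo) 2 = (hi - lo) / 2 :=
      PySem.Int.floordiv_eq_ediv_of_pos (by omega)
    rw [h2]; omega
  · have h2 : PySem.Int.floordiv (hi - lo) 2 = (hi - lo) / 2 :=
      PySem.Int.floordiv_eq_ediv_of_pos (by omega)
    rw [h2]; omega

def max_tournament_alt (lo : Int) (hi : Int) (seq : List Int) : Int × List Int :=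
  if lo ≥ hi then ((PySem.List.pyGet? seq lo).getD 0, [])
  else
    let window := PySem.List.slice seq (some lo) (some (hi + 1))
    let m := (PySem.List.max? window id).getD 0
    -- window[::-1].index(m); s[::-1] is reverse (PySem.List.slice?_none_none_neg_one)
    let w := hi - (((PySem.List.index? ((PySem.List.slice? window none none (-1)).getD []) m).getD 0 : Nat) : Int)
    (m, ((PySem.List.slice? (pvBeaten lo hi w seq) none none (-1)).getD []))

-- ===== PRECONDITION & SPEC =====
-- Pre_ excludes calls with lo < hi where lo < 0 or hi >= len(seq): there A's leaf lookups either
-- raise IndexError or wrap around via Python negative indexing (an accident of indexing neither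
-- implementation specifies; B's slice-based scan raises ValueError on those wrap-around inputs).
-- For lo >= hi it admits exactly the indices where seq[lo] does not raise.
def Pre_max_tournament (lo : Int) (hi : Int) (seq : List Int) : Prop :=
  if lo < hi then 0 ≤ lo ∧ hi < (seq.length : Int)
  else PySem.Raise.InRange seq.length lo
instance (lo : Int) (hi : Int) (seq : List Int) : Decidable (Pre_max_tournament lo hi seq) := by
  unfold Pre_max_tournament; infer_instance

def pvWitness_max_tournament : Int × Int × List Int := (0, 4, [3, 5, 2, 5, 1])

def Spec_max_tournament (lo : Int) (hi : Int) (seq : List Int) (out : Int × List Int) : Prop := out = max_tournament_alt lo hi seq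
instance (lo : Int) (hi : Int) (seq : List Int) (out : Int × List Int) : Decidable (Spec_max_tournament lo hi seq out) := by unfold Spec_max_tournament; infer_instance

-- ===== CLAIM (what is proved, stated in full; the proofs are below) =====
def Claim_equal_max_tournament : Prop := ∀ (lo : Int) (hi : Int) (seq : List Int), Dom_max_tournament lo hi seq → Pre_max_tournament lo hi seq → Spec_max_tournament lo hi seq (max_tournament lo hi seq)

-- ===== LEMMAS AND PROOFS =====
-- seq[i] as a total value (only used where 0 <= i < len)
def pvGet (seq : List Int) (i : Int) : Int := (PySem.List.pyGet? seq i).getD 0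

-- m is the maximum value of seq over indices lo..hi
def pvIsMax (lo : Int) (hi : Int) (seq : List Int) (m : Int) : Prop :=
  (∃ i, lo ≤ i ∧ i ≤ hi ∧ pvGet seq i = m) ∧ (∀ i, lo ≤ i → i ≤ hi → pvGet seq i ≤ m)

-- w is the rightmost index in lo..hi attaining m
def pvRArg (lo : Int) (hi : Int) (w : Int) (seq : List Int) (m : Int) : Prop :=
  lo ≤ w ∧ w ≤ hi ∧ pvGet seq w = m ∧ ∀ i, w < i → i ≤ hi → pvGet seq i ≠ m

theorem pvIsMax_unique {lo hi : Int} {seq : List Int} {m m' : Int}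
    (h : pvIsMax lo hi seq m) (h' : pvIsMax lo hi seq m') : m = m' := by
  obtain ⟨⟨i, hi1, hi2, hv⟩, hub⟩ := h
  obtain ⟨⟨j, hj1, hj2, hv'⟩, hub'⟩ := h'
  have := hub' i hi1 hi2
  have := hub j hj1 hj2
  omega

theorem pvWindow_get {seq : List Int} {lo hi : Int} (h0 : 0 ≤ lo) (h1 : lo ≤ hi)
    (h2 : hi < (seq.length : Int)) :
    (PySem.List.slice seq (some lo) (some (hi + 1))).length = (hi + 1 - lo).toNat ∧
    ∀ (j : Nat) (hj : j < (PySem.List.slice seq (some lo) (some (hi + 1))).length),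
      (PySem.List.slice seq (some lo) (some (hi + 1)))[j] = pvGet seq (lo + j) := by
  rw [PySem.List.slice_toNat seq h0 (by omega)]
  constructor
  · simp; omega
  · intro j hj
    simp only [List.length_take, List.length_drop, lt_min_iff] at hj
    rw [List.getElem_take, List.getElem_drop]
    unfold pvGet
    rw [PySem.List.pyGet?_of_nonneg seq (by omega)]
    have : (lo + (j:Int)).toNat = lo.toNat + j := by omega
    simp [this, List.getElem?_eq_getElem (show lo.toNat + j < seq.length by omega)]

theorem pvB_m {seq : List Int} {lo hi : Int} (h0 : 0 ≤ lo) (h1 : lo ≤ hi)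
    (h2 : hi < (seq.length : Int)) :
    pvIsMax lo hi seq ((PySem.List.max? (PySem.List.slice seq (some lo) (some (hi + 1))) id).getD 0) := by
  obtain ⟨hlen, hget⟩ := pvWindow_get h0 h1 h2
  set W := PySem.List.slice seq (some lo) (some (hi + 1)) with hW
  obtain ⟨m, hm⟩ : ∃ m, PySem.List.max? W id = some m := by
    cases hx : PySem.List.max? W id with
    | none =>
        rw [PySem.List.max?_eq_none_iff] at hx
        rw [hx] at hlen; simp at hlen; omega
    | some m => exact ⟨m, rfl⟩
  rw [hm]; simp only [Option.getD_some]
  constructor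
  · have hmem := PySem.List.max?_mem hm
    obtain ⟨j, hj, hvj⟩ := List.getElem_of_mem hmem
    refine ⟨lo + j, by omega, ?_, ?_⟩
    · have := hj; rw [hlen] at this; omega
    · rw [← hget j hj, hvj]
  · intro i hi1 hi2
    have hj : (i - lo).toNat < W.length := by rw [hlen]; omega
    have hv : pvGet seq i = W[(i - lo).toNat] := by
      rw [hget _ hj]; congr 1; omega
    rw [hv]
    have := PySem.List.max?_isMax hm (W[(i - lo).toNat]) (List.getElem_mem hj)
    simpa using this

theorem pvB_w {seq : List Int} {lo hi m : Int} (h0 : 0 ≤ lo) (h1 : lo ≤ hi)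
    (h2 : hi < (seq.length : Int))
    (hmem : m ∈ PySem.List.slice seq (some lo) (some (hi + 1))) :
    pvRArg lo hi (hi - (((PySem.List.index? (PySem.List.slice seq (some lo) (some (hi + 1))).reverse m).getD 0 : Nat) : Int)) seq m := by
  obtain ⟨hlen, hget⟩ := pvWindow_get h0 h1 h2
  set W := PySem.List.slice seq (some lo) (some (hi + 1)) with hW
  have hmemr : m ∈ W.reverse := by simpa using hmem
  obtain ⟨k, hk⟩ : ∃ k, PySem.List.index? W.reverse m = some k := by
    cases hx : PySem.List.index? W.reverse m with
    | none => rw [PySem.List.index?_eq_none_iff] at hx; exact absurd hmemr hx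
    | some k => exact ⟨k, rfl⟩
  obtain ⟨hklen, hkval, hkfirst⟩ := PySem.List.getElem_of_index?_eq_some hk
  rw [hk]; simp only [Option.getD_some]
  have hklen' : k < W.length := by simpa using hklen
  have hL : (W.length : Int) = hi + 1 - lo := by rw [hlen]; omega
  refine ⟨by omega, by omega, ?_, ?_⟩
  · -- pvGet seq (hi - k) = m
    have hrev : W.reverse[k]'hklen = W[W.length - 1 - k]'(by omega) := by
      rw [List.getElem_reverse]
    have hidx : ((hi - (k:Int)) - lo).toNat = W.length - 1 - k := by omega
    have := hget (W.length - 1 - k) (by omega)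
    rw [hrev] at hkval
    rw [← hkval, this]; congr 1; omega
  · intro i hgt hle
    have hj : (i - lo).toNat < W.length := by rw [hlen]; omega
    set j := (i - lo).toNat with hjdef
    have hjrev : W.length - 1 - j < k := by omega
    have hne := hkfirst (W.length - 1 - j) hjrev
    have hrev : W.reverse[W.length - 1 - j]'(by simpa using (by omega : W.length - 1 - j < W.length)) =
        W[W.length - 1 - (W.length - 1 - j)]'(by omega) := by
      rw [List.getElem_reverse]
    intro hcon
    apply hne
    rw [hrev]
    have hidx2 : W.length - 1 - (W.length - 1 - j) = j := by omega
    have hc : W[W.length - 1 - (W.length - 1 - j)]'(by omega) = W[j] := getElem_congr_idx hidx2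
    rw [hc, hget j hj, show lo + (j:Int) = i by omega]
    exact hcon

theorem pvA_isMax {seq : List Int} : ∀ (n : Nat) (lo hi : Int), (hi - lo).toNat ≤ n →
    0 ≤ lo → lo ≤ hi → hi < (seq.length : Int) →
    pvIsMax lo hi seq (max_tournament lo hi seq).1 := by
  intro n
  induction n with
  | zero =>
      intro lo hi hn h0 h1 h2
      have : lo = hi := by omega
      subst this
      rw [max_tournament]
      simp only [ge_iff_le, le_refl, if_pos]
      exact ⟨⟨lo, le_refl _, le_refl _, rfl⟩, fun i hi1 hi2 => by
        have : i = lo := by omega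
        simp [this, pvGet]⟩
  | succ n ih =>
      intro lo hi hn h0 h1 h2
      by_cases hge : lo ≥ hi
      · have : lo = hi := by omega
        subst this
        rw [max_tournament]
        simp only [ge_iff_le, le_refl, if_pos]
        exact ⟨⟨lo, le_refl _, le_refl _, rfl⟩, fun i hi1 hi2 => by
          have : i = lo := by omega
          simp [this, pvGet]⟩
      · push_neg at hge
        have hfd : PySem.Int.floordiv (hi - lo) 2 = (hi - lo) / 2 :=
          PySem.Int.floordiv_eq_ediv_of_pos (by omega)
        set mid := lo + PySem.Int.floordiv (hi - lo) 2 with hmid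
        have hmb : lo ≤ mid ∧ mid < hi := by rw [hmid, hfd]; omega
        have ih1 := ih lo mid (by omega) h0 hmb.1 (by omega)
        have ih2 := ih (mid + 1) hi (by omega) (by omega) (by omega) h2
        rw [max_tournament]
        simp only [ge_iff_le, if_neg (by omega : ¬ hi ≤ lo)]
        rw [← hmid]
        by_cases hcmp : (max_tournament lo mid seq).1 > (max_tournament (mid + 1) hi seq).1
        · simp only [if_pos hcmp]
          obtain ⟨⟨i, hia, hib, hiv⟩, hub1⟩ := ih1
          obtain ⟨_, hub2⟩ := ih2
          exact ⟨⟨i, by omega, by omega, hiv⟩, fun j hj1 hj2 => by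
            by_cases hjm : j ≤ mid
            · exact hub1 j hj1 hjm
            · exact le_of_lt (lt_of_le_of_lt (hub2 j (by omega) hj2) hcmp)⟩
        · simp only [if_neg hcmp]
          push_neg at hcmp
          obtain ⟨⟨i, hia, hib, hiv⟩, hub2⟩ := ih2
          obtain ⟨_, hub1⟩ := ih1
          exact ⟨⟨i, by omega, by omega, hiv⟩, fun j hj1 hj2 => by
            by_cases hjm : j ≤ mid
            · exact le_trans (hub1 j hj1 hjm) hcmp
            · exact hub2 j (by omega) hj2⟩

theorem pvMain {seq : List Int} : ∀ (n : Nat) (lo hi w m : Int), (hi - lo).toNat ≤ n →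
    0 ≤ lo → lo ≤ hi → hi < (seq.length : Int) →
    pvIsMax lo hi seq m → pvRArg lo hi w seq m →
    max_tournament lo hi seq = (m, (pvBeaten lo hi w seq).reverse) := by
  intro n
  induction n with
  | zero =>
      intro lo hi w m hn h0 h1 h2 hmax harg
      have : lo = hi := by omega
      subst this
      rw [max_tournament, pvBeaten]
      simp only [ge_iff_le, le_refl, if_pos, List.reverse_nil]
      have : pvGet seq lo = m := by
        obtain ⟨⟨i, hia, hib, hiv⟩, _⟩ := hmax
        have : i = lo := by omega
        subst this; exact hiv
      rw [← this]; rfl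
  | succ n ih =>
      intro lo hi w m hn h0 h1 h2 hmax harg
      by_cases hge : lo ≥ hi
      · have : lo = hi := by omega
        subst this
        rw [max_tournament, pvBeaten]
        simp only [ge_iff_le, le_refl, if_pos, List.reverse_nil]
        have : pvGet seq lo = m := by
          obtain ⟨⟨i, hia, hib, hiv⟩, _⟩ := hmax
          have : i = lo := by omega
          subst this; exact hiv
        rw [← this]; rfl
      · push_neg at hge
        have hfd : PySem.Int.floordiv (hi - lo) 2 = (hi - lo) / 2 :=
          PySem.Int.floordiv_eq_ediv_of_pos (by omega)
        set mid := lo + PySem.Int.floordiv (hi - lo) 2 with hmid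
        have hmb : lo ≤ mid ∧ mid < hi := by rw [hmid, hfd]; omega
        have hm1 := pvA_isMax ((mid - lo).toNat) lo mid (le_refl _) h0 hmb.1 (lt_trans hmb.2 h2)
        have hm2 := pvA_isMax ((hi - (mid + 1)).toNat) (mid + 1) hi (le_refl _) (by omega) (by omega) h2
        set m1 := (max_tournament lo mid seq).1 with hm1d
        set m2 := (max_tournament (mid + 1) hi seq).1 with hm2d
        obtain ⟨hwlo, hwhi, hwv, hwlast⟩ := harg
        rw [max_tournament, pvBeaten]
        simp only [ge_iff_le, if_neg (by omega : ¬ hi ≤ lo)]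
        rw [← hmid]
        by_cases hw : w ≤ mid
        · -- winner in the left half: m1 = m and m2 < m
          have hm1m : m1 = m := by
            apply pvIsMax_unique hm1
            refine ⟨⟨w, hwlo, hw, hwv⟩, fun i hi1 hi2 => hmax.2 i hi1 (by omega)⟩
          have hm2m : m2 < m := by
            obtain ⟨⟨i, hia, hib, hiv⟩, _⟩ := hm2
            have hle := hmax.2 i (by omega) hib
            have hne := hwlast i (by omega) hib
            omega
          have harg' : pvRArg lo mid w seq m :=
            ⟨hwlo, hw, hwv, fun i hi1 hi2 => hwlast i hi1 (by omega)⟩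
          have hmax' : pvIsMax lo mid seq m := by rw [← hm1m]; exact hm1
          have hrec := ih lo mid w m (by omega) h0 hmb.1 (lt_trans hmb.2 h2) hmax' harg'
          have hbv : (PySem.List.max? (PySem.List.slice seq (some (mid + 1)) (some (hi + 1))) id).getD 0 = m2 :=
            pvIsMax_unique (pvB_m (by omega) (by omega) h2) hm2
          rw [if_pos hw, hrec, ← hm2d, hbv,
            if_pos (show ((m, (pvBeaten lo mid w seq).reverse)).1 > m2 from by simpa using by omega)]
          simp [List.reverse_cons]
        · -- winner in the right half: m2 = m and m1 ≤ m
          push_neg at hw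
          have hm2m : m2 = m := by
            apply pvIsMax_unique hm2
            refine ⟨⟨w, by omega, hwhi, hwv⟩, fun i hi1 hi2 => hmax.2 i (by omega) hi2⟩
          have hm1m : m1 ≤ m := by
            obtain ⟨⟨i, hia, hib, hiv⟩, _⟩ := hm1
            have hle := hmax.2 i hia (by omega)
            omega
          have harg' : pvRArg (mid + 1) hi w seq m := ⟨by omega, hwhi, hwv, hwlast⟩
          have hmax' : pvIsMax (mid + 1) hi seq m := by rw [← hm2m]; exact hm2
          have hrec := ih (mid + 1) hi w m (by omega) (by omega) (by omega) h2 hmax' harg'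
          have hbv : (PySem.List.max? (PySem.List.slice seq (some lo) (some (mid + 1))) id).getD 0 = m1 :=
            pvIsMax_unique (pvB_m h0 hmb.1 (lt_trans hmb.2 h2)) hm1
          rw [if_neg (by omega : ¬ w ≤ mid), hrec, ← hm1d, hbv,
            if_neg (show ¬ m1 > ((m, (pvBeaten (mid + 1) hi w seq).reverse)).1 from by simpa using by omega)]
          simp [List.reverse_cons]

-- ===== VERDICT (by name: the statement is the Claim_ definition above) =====
theorem max_tournament_spec : Claim_equal_max_tournament := by
  intro lo hi seq _ hpre
  unfold Spec_max_tournament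
  unfold Pre_max_tournament at hpre
  by_cases hlt : lo < hi
  · rw [if_pos hlt] at hpre
    obtain ⟨h0, h2⟩ := hpre
    have h1 : lo ≤ hi := le_of_lt hlt
    rw [max_tournament_alt]
    simp only [ge_iff_le, if_neg (by omega : ¬ hi ≤ lo)]
    simp only [PySem.List.slice?_none_none_neg_one, Option.getD_some]
    set W := PySem.List.slice seq (some lo) (some (hi + 1)) with hWd
    set m := (PySem.List.max? W id).getD 0 with hmd
    have hmax : pvIsMax lo hi seq m := pvB_m h0 h1 h2
    have hmem : m ∈ W := by
      obtain ⟨hlen, _⟩ := pvWindow_get h0 h1 h2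
      obtain ⟨mm, hmm⟩ : ∃ mm, PySem.List.max? W id = some mm := by
        cases hx : PySem.List.max? W id with
        | none =>
            rw [PySem.List.max?_eq_none_iff] at hx
            rw [← hWd, hx] at hlen; simp at hlen; omega
        | some mm => exact ⟨mm, rfl⟩
      rw [hmd, hmm]
      simpa using PySem.List.max?_mem hmm
    have harg := pvB_w h0 h1 h2 hmem
    exact pvMain ((hi - lo).toNat) lo hi _ m (le_refl _) h0 h1 h2 hmax harg
  · rw [if_neg hlt] at hpre
    rw [max_tournament, max_tournament_alt]
    simp only [ge_iff_le, if_pos (by omega : hi ≤ lo)]
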